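-- pv_equiv track=rewrite | github.com/misha21k/Checkio | Solve_The_Ship_Teams.py | two_teams
-- ===== SOURCE A (Python) =====
-- def two_teams(sailors):
-- 	first_ship = []
-- 	second_ship = []
-- 	for key, item in sailors.items():
-- 		if sailors[key] < 20 or sailors[key] > 40:
-- 			first_ship.append(key)
-- 		else:
-- 			second_ship.append(key)
-- 	first_ship.sort()
-- 	second_ship.sort()
--
-- 	return [
-- 		first_ship,
-- 		second_ship
-- 	]
-- ===== SOURCE B (Python) =====
-- def two_teams(sailors):
--     def team(key):
--         return 1 if 20 <= sailors[key] <= 40 else 0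
--     order = sorted(sailors, key=lambda key: (team(key), key))
--     cut = sum(1 for key in sailors if team(key) == 0)
--     return [order[:cut], order[cut:]]
-- ===== Notes on version B (the rewrite author's own statement) =====
-- stated objective: alternative
-- what changed: A partitions the keys into two lists by the age test and then sorts each list separately; B never builds two lists during iteration: it performs one single sort of all keys under the composite key (team, name) and then splits the sorted list at the index equal to the number of first-ship sailors.
import Mathlib
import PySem

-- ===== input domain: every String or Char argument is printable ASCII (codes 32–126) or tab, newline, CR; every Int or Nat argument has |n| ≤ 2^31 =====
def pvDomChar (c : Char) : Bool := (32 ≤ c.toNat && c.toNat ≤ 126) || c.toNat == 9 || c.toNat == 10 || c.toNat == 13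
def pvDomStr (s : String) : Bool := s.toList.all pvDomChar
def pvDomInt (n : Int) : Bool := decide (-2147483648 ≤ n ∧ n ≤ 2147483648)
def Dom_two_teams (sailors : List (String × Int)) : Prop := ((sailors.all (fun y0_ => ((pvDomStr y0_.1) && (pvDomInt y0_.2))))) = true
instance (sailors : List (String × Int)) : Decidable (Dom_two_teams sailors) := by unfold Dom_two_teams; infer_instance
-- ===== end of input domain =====

-- One honest line: A partitions the keys by the age test and sorts each team separately;
-- B does one sort of all keys under the composite key (team, name) and splits at the
-- first-team count — an alternative decomposition, same cost; neither mutates its argument.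

-- ===== PORT A =====
-- Python's `sailors[key]` — first-match lookup in the association list.
-- The default 0 is unreachable: every key looked up comes from `sailors` itself.
def pvVal (sailors : List (String × Int)) (k : String) : Int :=
  (PySem.Dict.mk sailors).getD k 0

def two_teams (sailors : List (String × Int)) : List (List String) :=
  let r := sailors.foldl
    (fun (acc : List String × List String) kv =>
      if pvVal sailors kv.1 < 20 ∨ pvVal sailors kv.1 > 40 then
        (acc.1 ++ [kv.1], acc.2)
      else
        (acc.1, acc.2 ++ [kv.1]))
    ([], [])
  [PySem.List.sorted r.1 (fun x => x) false,
   PySem.List.sorted r.2 (fun x => x) false]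

-- ===== PORT B =====
-- Source B's helper `team(key)`: 1 if 20 <= sailors[key] <= 40 else 0
def pvTeam (sailors : List (String × Int)) (key : String) : Int :=
  if 20 ≤ pvVal sailors key ∧ pvVal sailors key ≤ 40 then 1 else 0

def two_teams_alt (sailors : List (String × Int)) : List (List String) :=
  let keys := sailors.map (fun kv => kv.1)
  -- sorted(sailors, key=lambda key: (team(key), key)) — tuple key, PySem.List.sorted2
  let order := PySem.List.sorted2 keys (pvTeam sailors) (fun k => k) false
  -- cut = sum(1 for key in sailors if team(key) == 0)
  let cut : Int := keys.foldl (fun acc key => if pvTeam sailors key = 0 then acc + 1 else acc) 0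
  [PySem.List.slice order none (some cut), PySem.List.slice order (some cut) none]

-- ===== PRECONDITION & SPEC =====
def Spec_two_teams (sailors : List (String × Int)) (out : List (List String)) : Prop := out = two_teams_alt sailors
instance (sailors : List (String × Int)) (out : List (List String)) : Decidable (Spec_two_teams sailors out) := by unfold Spec_two_teams; infer_instance

-- ===== CLAIM (what is proved, stated in full; the proofs are below) =====
def Claim_equal_two_teams : Prop := ∀ (sailors : List (String × Int)), Dom_two_teams sailors → Spec_two_teams sailors (two_teams sailors)

-- ===== LEMMAS AND PROOFS =====

-- A's partition loop, characterised: it appends the p- and not-p-filters of the keys.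
theorem pvFold_eq (p : String → Prop) [DecidablePred p] (ks : List String)
    (fs ss : List String) :
    ks.foldl
      (fun (acc : List String × List String) k =>
        if p k then (acc.1 ++ [k], acc.2) else (acc.1, acc.2 ++ [k]))
      (fs, ss)
    = (fs ++ ks.filter (fun k => decide (p k)), ss ++ ks.filter (fun k => !decide (p k))) := by
  induction ks generalizing fs ss with
  | nil => simp
  | cons k ks ih =>
    by_cases h : p k <;> simp [h, List.foldl_cons, ih]

-- inserting a p-element into (all-p A ++ all-¬p B) lands inside A
theorem pvInsert_left (before b0 : String → String → Bool) (x : String)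
    (A B : List String)
    (hA : ∀ y ∈ A, before x y = b0 x y) (hB : ∀ y ∈ B, before x y = true) :
    PySem.List.insertBy before x (A ++ B) = PySem.List.insertBy b0 x A ++ B := by
  induction A with
  | nil =>
    cases B with
    | nil => simp [PySem.List.insertBy]
    | cons y t => simp [PySem.List.insertBy, hB y (by simp)]
  | cons a A ih =>
    have hx := hA a (by simp)
    by_cases h : b0 x a = true
    · simp [PySem.List.insertBy, hx, h]
    · simp only [List.cons_append, PySem.List.insertBy, hx, h]
      simp [ih (fun y hy => hA y (by simp [hy]))]

-- inserting a ¬p-element into (all-p A ++ all-¬p B) lands inside B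
theorem pvInsert_right (before b0 : String → String → Bool) (x : String)
    (A B : List String)
    (hA : ∀ y ∈ A, before x y = false) (hB : ∀ y ∈ B, before x y = b0 x y) :
    PySem.List.insertBy before x (A ++ B) = A ++ PySem.List.insertBy b0 x B := by
  induction A with
  | nil =>
    induction B with
    | nil => simp [PySem.List.insertBy]
    | cons y t ihB =>
      have hy := hB y (by simp)
      by_cases h : b0 x y = true
      · simp [PySem.List.insertBy, hy, h]
      · simp only [List.nil_append, PySem.List.insertBy, hy, h]
        simpa using ihB (fun z hz => hB z (by simp [hz]))
  | cons a A ih =>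
    have hx := hA a (by simp)
    simp only [List.cons_append, PySem.List.insertBy, hx]
    simp [ih (fun y hy => hA y (by simp [hy]))]

-- B's lexicographic comparator for the (team, name) key, and the plain name comparator
def pvBefore (sailors : List (String × Int)) (a b : String) : Bool :=
  decide (pvTeam sailors a < pvTeam sailors b) ||
    (!decide (pvTeam sailors b < pvTeam sailors a) && decide (a < b))

def pvB0 (a b : String) : Bool := decide (a < b)

-- p = "goes to the first ship" as B's team function sees it
def pvP (sailors : List (String × Int)) (k : String) : Bool :=
  decide (pvTeam sailors k = 0)

theorem pvTeam_cases (sailors : List (String × Int)) (k : String) :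
    pvTeam sailors k = 0 ∨ pvTeam sailors k = 1 := by
  unfold pvTeam; split_ifs <;> simp

-- the lexicographic insertion over (team, name) splits into two plain insertions
theorem pvFold2_split (sailors : List (String × Int)) (ks A B : List String)
    (hA : ∀ y ∈ A, pvP sailors y = true) (hB : ∀ y ∈ B, pvP sailors y = false) :
    ks.foldl (fun acc x => PySem.List.insertBy (pvBefore sailors) x acc) (A ++ B)
    = (ks.filter (pvP sailors)).foldl (fun acc x => PySem.List.insertBy pvB0 x acc) A
      ++ (ks.filter (fun k => !pvP sailors k)).foldl (fun acc x => PySem.List.insertBy pvB0 x acc) B := by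
  induction ks generalizing A B with
  | nil => simp
  | cons k ks ih =>
    have team01 := pvTeam_cases sailors
    by_cases hk : pvP sailors k = true
    · have h1 : PySem.List.insertBy (pvBefore sailors) k (A ++ B)
          = PySem.List.insertBy pvB0 k A ++ B := by
        apply pvInsert_left
        · intro y hy
          have hty : pvTeam sailors y = 0 := by have := hA y hy; simpa [pvP] using this
          have htk : pvTeam sailors k = 0 := by simpa [pvP] using hk
          simp [pvBefore, pvB0, hty, htk]
        · intro y hy
          have hty : pvTeam sailors y = 1 := by
            have := hB y hy; rcases team01 y with h | h
            · simp [pvP, h] at this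
            · exact h
          have htk : pvTeam sailors k = 0 := by simpa [pvP] using hk
          simp [pvBefore, pvB0, hty, htk]
      have hA' : ∀ y ∈ PySem.List.insertBy pvB0 k A, pvP sailors y = true := by
        intro y hy
        rcases (PySem.List.mem_insertBy pvB0 k y A).1 hy with h | h
        · subst h; exact hk
        · exact hA y h
      simp only [List.foldl_cons, h1, List.filter_cons, hk]
      simp only [ih (PySem.List.insertBy pvB0 k A) B hA' hB]
      simp
    · have hk' : pvP sailors k = false := by simpa using hk
      have htk : pvTeam sailors k = 1 := by
        rcases team01 k with h | h
        · simp [pvP, h] at hk'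
        · exact h
      have h1 : PySem.List.insertBy (pvBefore sailors) k (A ++ B)
          = A ++ PySem.List.insertBy pvB0 k B := by
        apply pvInsert_right
        · intro y hy
          have hty : pvTeam sailors y = 0 := by have := hA y hy; simpa [pvP] using this
          simp [pvBefore, pvB0, hty, htk]
        · intro y hy
          have hty : pvTeam sailors y = 1 := by
            have := hB y hy; rcases team01 y with h | h
            · simp [pvP, h] at this
            · exact h
          simp [pvBefore, pvB0, hty, htk]
      have hB' : ∀ y ∈ PySem.List.insertBy pvB0 k B, pvP sailors y = false := by
        intro y hy
        rcases (PySem.List.mem_insertBy pvB0 k y B).1 hy with h | h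
        · subst h; exact hk'
        · exact hB y h
      simp only [List.foldl_cons, h1, List.filter_cons, hk']
      simp only [ih A (PySem.List.insertBy pvB0 k B) hA hB']
      simp

-- sorted2 over (team, name) IS the two per-team sorts, concatenated
theorem pvSorted2_eq (sailors : List (String × Int)) (ks : List String) :
    PySem.List.sorted2 ks (pvTeam sailors) (fun k => k) false
    = PySem.List.sorted (ks.filter (pvP sailors)) (fun x => x) false
      ++ PySem.List.sorted (ks.filter (fun k => !pvP sailors k)) (fun x => x) false := by
  have h := pvFold2_split sailors ks [] [] (by simp) (by simp)
  simp only [List.nil_append] at h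
  rw [PySem.List.sorted_eq_foldl_insertBy, PySem.List.sorted_eq_foldl_insertBy]
  exact h

-- the two predicates agree: team(k) == 0  ↔  sailors[k] < 20 or sailors[k] > 40
theorem pvP_eq (sailors : List (String × Int)) (k : String) :
    pvP sailors k = decide (pvVal sailors k < 20 ∨ pvVal sailors k > 40) := by
  unfold pvP pvTeam
  split_ifs with h <;> simp <;> omega

-- ===== VERDICT (by name: the statement is the Claim_ definition above) =====
theorem two_teams_spec : Claim_equal_two_teams := by
  intro sailors _
  show two_teams sailors = two_teams_alt sailors
  unfold two_teams two_teams_alt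
  have hA :
      sailors.foldl
        (fun (acc : List String × List String) kv =>
          if pvVal sailors kv.1 < 20 ∨ pvVal sailors kv.1 > 40 then
            (acc.1 ++ [kv.1], acc.2)
          else
            (acc.1, acc.2 ++ [kv.1]))
        ([], [])
      = (sailors.map (fun kv => kv.1)).foldl
        (fun (acc : List String × List String) k =>
          if pvVal sailors k < 20 ∨ pvVal sailors k > 40 then
            (acc.1 ++ [k], acc.2)
          else
            (acc.1, acc.2 ++ [k]))
        ([], []) := by
    rw [List.foldl_map]
  have hfilt : (fun k => decide (pvVal sailors k < 20 ∨ pvVal sailors k > 40)) = pvP sailors := by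
    funext k; rw [pvP_eq]
  have hfilt' : (fun k => !decide (pvVal sailors k < 20 ∨ pvVal sailors k > 40))
      = (fun k => !pvP sailors k) := by
    funext k; rw [pvP_eq]
  rw [hA, pvFold_eq (fun k => pvVal sailors k < 20 ∨ pvVal sailors k > 40), hfilt, hfilt']
  simp only [List.nil_append]
  set keys := sailors.map (fun kv => kv.1) with hkeys
  have hcut : keys.foldl (fun acc key => if pvTeam sailors key = 0 then acc + 1 else acc) (0 : Int)
      = ((keys.filter (pvP sailors)).length : Int) := by
    rw [show (fun (acc : Int) key => if pvTeam sailors key = 0 then acc + 1 else acc)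
        = (fun (acc : Int) key => if pvP sailors key = true then acc + 1 else acc) by
        funext acc key; simp [pvP]]
    rw [PySem.List.foldl_count_if (pvP sailors) keys 0]
    simp [List.countP_eq_length_filter]
  simp only [pvSorted2_eq sailors keys, hcut]
  set F := PySem.List.sorted (keys.filter (pvP sailors)) (fun x => x) false with hF
  set S := PySem.List.sorted (keys.filter (fun k => !pvP sailors k)) (fun x => x) false with hS
  have hlen : F.length = (keys.filter (pvP sailors)).length := by
    rw [hF]; exact (PySem.List.sorted_perm _ _ _).length_eq
  rw [PySem.List.slice_to _ (by positivity), PySem.List.slice_from _ (by positivity)]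
  simp [← hlen, List.take_left, List.drop_left]
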